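-- pv_equiv track=rewrite | github.com/awawa-agi/agent-factory | src/agentfactory/visualizer_new/data/token_adapter.py | _identify_collapse_groups
-- ===== SOURCE A (Python) =====
-- from typing import List, Dict, Any, Optional, Tuple
--
-- def _identify_collapse_groups(assistant_masks: List[int], min_length: int = 3) -> List[Optional[int]]:
--     """Identify consecutive groups of non-assistant tokens that should be collapsed"""
--     collapse_groups = [None] * len(assistant_masks)
--     group_id = 0
--     i = 0
--
--     while i < len(assistant_masks):
--         if assistant_masks[i] == 0:
--             start = i
--             while i < len(assistant_masks) and assistant_masks[i] == 0:
--                 i += 1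
--
--             if i - start >= min_length:
--                 for j in range(start, i):
--                     collapse_groups[j] = group_id
--                 group_id += 1
--         else:
--             i += 1
--
--     return collapse_groups
-- ===== SOURCE B (Python) =====
-- def _identify_collapse_groups(assistant_masks, min_length=3):
--     """Run-length encode the mask, then emit one labeled block per run."""
--     runs = []
--     for x in assistant_masks:
--         if runs and runs[-1][0] == x:
--             runs[-1] = (x, runs[-1][1] + 1)
--         else:
--             runs.append((x, 1))
--     out = []
--     group_id = 0
--     for v, c in runs:
--         if v == 0 and c >= min_length:
--             out += [group_id] * c
--             group_id += 1
--         else: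
--             out += [None] * c
--     return out
-- ===== Notes on version B (the rewrite author's own statement) =====
-- stated objective: alternative
-- what changed: B first run-length encodes the whole mask into (value,count) pairs and then emits one labeled block per run by concatenation, instead of A's in-place index-walking that pre-allocates the result and rewrites slots only for qualifying zero runs.
import Mathlib
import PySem

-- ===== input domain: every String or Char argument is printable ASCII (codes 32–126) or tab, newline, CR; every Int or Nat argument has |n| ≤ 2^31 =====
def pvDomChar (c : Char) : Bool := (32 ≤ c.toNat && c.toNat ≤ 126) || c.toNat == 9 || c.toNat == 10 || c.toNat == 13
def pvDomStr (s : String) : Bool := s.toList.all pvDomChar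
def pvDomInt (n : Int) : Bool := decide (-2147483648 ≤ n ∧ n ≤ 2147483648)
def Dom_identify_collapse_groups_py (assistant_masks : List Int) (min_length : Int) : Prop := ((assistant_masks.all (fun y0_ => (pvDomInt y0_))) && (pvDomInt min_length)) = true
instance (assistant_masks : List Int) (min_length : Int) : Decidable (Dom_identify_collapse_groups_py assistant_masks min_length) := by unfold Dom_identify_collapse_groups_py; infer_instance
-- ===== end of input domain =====

-- B re-implements A as a two-pass run-length encoding + block emission (same O(n) cost, alternative structure).

-- ===== PORT A =====
-- inner `while i < len(assistant_masks) and assistant_masks[i] == 0: i += 1`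
def pvAInner (masks : List Int) (i : Nat) : Nat :=
  if h : i < masks.length then
    if masks[i] == 0 then pvAInner masks (i + 1) else i
  else i
termination_by masks.length - i

theorem pvAInner_zero (masks : List Int) (i : Nat) (h : i < masks.length)
    (h0 : masks[i] == 0) : pvAInner masks i = pvAInner masks (i + 1) := by
  rw [pvAInner]; simp [h, h0]

theorem pvAInner_ge (masks : List Int) (i : Nat) : i ≤ pvAInner masks i := by
  unfold pvAInner
  split
  · split
    · have := pvAInner_ge masks (i + 1); omega
    · omega
  · omega
termination_by masks.length - i

-- outer while loop of A: state (i, collapse_groups, group_id)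
def pvAOuter (masks : List Int) (min_length : Int) (i : Nat)
    (cg : List (Option Int)) (gid : Int) : List (Option Int) :=
  if h : i < masks.length then
    if masks[i] == 0 then
      let start := i
      let i2 := pvAInner masks i
      if min_length ≤ (i2 : Int) - (start : Int) then
        -- `for j in range(start, i): collapse_groups[j] = group_id`
        pvAOuter masks min_length i2
          ((List.range' start (i2 - start)).foldl (fun c j => c.set j (some gid)) cg) (gid + 1)
      else
        pvAOuter masks min_length i2 cg gid
    else
      pvAOuter masks min_length (i + 1) cg gid
  else cg
termination_by masks.length - i
decreasing_by
  · have h2 : i + 1 ≤ pvAInner masks (i + 1) := pvAInner_ge masks (i + 1)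
    have h3 : pvAInner masks i = pvAInner masks (i + 1) := pvAInner_zero masks i h (by simp_all)
    omega
  · have h2 : i + 1 ≤ pvAInner masks (i + 1) := pvAInner_ge masks (i + 1)
    have h3 : pvAInner masks i = pvAInner masks (i + 1) := pvAInner_zero masks i h (by simp_all)
    omega
  · omega

def identify_collapse_groups_py (assistant_masks : List Int) (min_length : Int) : List (Option Int) :=
  pvAOuter assistant_masks min_length 0 (List.replicate assistant_masks.length none) 0

-- ===== PORT B =====
-- `if runs and runs[-1][0] == x: runs[-1] = (x, runs[-1][1] + 1) else: runs.append((x, 1))`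
def pvRleStep (runs : List (Int × Int)) (x : Int) : List (Int × Int) :=
  match runs.getLast? with
  | some (v, c) => if v == x then runs.dropLast ++ [(x, c + 1)] else runs ++ [(x, 1)]
  | none => runs ++ [(x, 1)]

-- `if v == 0 and c >= min_length: out += [gid]*c; gid += 1 else: out += [None]*c`
def pvEmitStep (min_length : Int) (st : List (Option Int) × Int) (vc : Int × Int) :
    List (Option Int) × Int :=
  if vc.1 == 0 && decide (min_length ≤ vc.2) then
    (st.1 ++ List.replicate vc.2.toNat (some st.2), st.2 + 1)
  else
    (st.1 ++ List.replicate vc.2.toNat none, st.2)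

def identify_collapse_groups_py_alt (assistant_masks : List Int) (min_length : Int) : List (Option Int) :=
  ((assistant_masks.foldl pvRleStep []).foldl (pvEmitStep min_length) ([], 0)).1

-- ===== PRECONDITION & SPEC =====
def Spec_identify_collapse_groups_py (assistant_masks : List Int) (min_length : Int) (out : List (Option Int)) : Prop := out = identify_collapse_groups_py_alt assistant_masks min_length
instance (assistant_masks : List Int) (min_length : Int) (out : List (Option Int)) : Decidable (Spec_identify_collapse_groups_py assistant_masks min_length out) := by unfold Spec_identify_collapse_groups_py; infer_instance

-- ===== CLAIM (what is proved, stated in full; the proofs are below) =====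
def Claim_equal_identify_collapse_groups_py : Prop := ∀ (assistant_masks : List Int) (min_length : Int), Dom_identify_collapse_groups_py assistant_masks min_length → Spec_identify_collapse_groups_py assistant_masks min_length (identify_collapse_groups_py assistant_masks min_length)

-- ===== LEMMAS AND PROOFS =====

-- common specification: process the list run by run
def pvG (m : Int) (l : List Int) (gid : Int) : List (Option Int) :=
  match l with
  | [] => []
  | x :: xs =>
    let r := (xs.takeWhile (· == x)).length + 1
    if x == 0 && decide (m ≤ (r : Int)) then
      List.replicate r (some gid) ++ pvG m (xs.dropWhile (· == x)) (gid + 1)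
    else
      List.replicate r none ++ pvG m (xs.dropWhile (· == x)) gid
termination_by l.length
decreasing_by
  all_goals (have := List.length_dropWhile_le (p := (· == x)) (l := xs); simp only [List.length_cons]; omega)

theorem pvG_cons (m x : Int) (xs : List Int) (gid : Int) :
    pvG m (x :: xs) gid =
      if x == 0 && decide (m ≤ (((xs.takeWhile (· == x)).length + 1 : Nat) : Int)) then
        List.replicate ((xs.takeWhile (· == x)).length + 1) (some gid) ++ pvG m (xs.dropWhile (· == x)) (gid + 1)
      else
        List.replicate ((xs.takeWhile (· == x)).length + 1) none ++ pvG m (xs.dropWhile (· == x)) gid := by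
  rw [pvG.eq_def]

theorem pvG_nonzero (m : Int) (x : Int) (hx : ¬ x = 0) (xs : List Int) (gid : Int) :
    pvG m (x :: xs) gid = none :: pvG m xs gid := by
  have hx0 : (x == 0) = false := by simpa using hx
  cases xs with
  | nil => rw [pvG.eq_def]; simp [hx0, pvG]
  | cons y ys =>
    by_cases hyx : (y == x) = true
    · have hy : y = x := by simpa using hyx
      subst hy
      rw [pvG.eq_def]
      conv_rhs => rw [pvG.eq_def]
      simp [hx0, List.takeWhile_cons, List.dropWhile_cons, List.replicate_succ]
    · have hyx' : (y == x) = false := by simpa using hyx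
      rw [pvG.eq_def]
      simp [hx0, hyx', List.takeWhile_cons, List.dropWhile_cons]

-- ----- A side -----
theorem pvAInner_eq (masks : List Int) (i : Nat) :
    pvAInner masks i = i + ((masks.drop i).takeWhile (· == 0)).length := by
  induction i using pvAInner.induct (masks := masks) with
  | case1 i h h0 ih =>
    rw [pvAInner, List.drop_eq_getElem_cons h]
    simp only [h, dite_true, h0, if_pos, List.takeWhile_cons, List.length_cons, ih]
    omega
  | case2 i h h0 =>
    rw [pvAInner]
    simp only [h, dite_true]
    rw [List.drop_eq_getElem_cons h]
    simp [List.takeWhile_cons, h0]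
  | case3 i h =>
    rw [pvAInner]
    have hd : masks.drop i = [] := List.drop_eq_nil_of_le (by omega)
    simp [h, hd]

theorem pvFill_eq (gid : Int) (r : Nat) : ∀ (cg : List (Option Int)) (s : Nat), s + r ≤ cg.length →
    (List.range' s r).foldl (fun c j => c.set j (some gid)) cg
      = cg.take s ++ List.replicate r (some gid) ++ cg.drop (s + r) := by
  induction r with
  | zero => intro cg s h; simp
  | succ r ih =>
    intro cg s h
    have hs : s < cg.length := by omega
    rw [List.range'_succ, List.foldl_cons, ih (cg.set s (some gid)) (s + 1) (by simp; omega)]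
    rw [List.set_eq_take_cons_drop _ hs]
    have hlen : (cg.take s).length = s := by simp; omega
    have h1 : (cg.take s ++ some gid :: cg.drop (s + 1)).take (s + 1)
        = cg.take s ++ [some gid] := by
      rw [List.take_append]
      simp [hlen]
    have h2 : (cg.take s ++ some gid :: cg.drop (s + 1)).drop (s + 1 + r)
        = cg.drop (s + (r + 1)) := by
      rw [List.drop_append]
      have e1 : List.drop (s + 1 + r) (List.take s cg) = [] :=
        List.drop_eq_nil_of_le (by simp; omega)
      have e2 : s + 1 + r - (List.take s cg).length = r + 1 := by rw [hlen]; omega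
      rw [e1, e2, List.nil_append, List.drop_succ_cons, List.drop_drop]
      congr 1
      omega
    rw [h1, h2]
    simp [List.replicate_succ, List.append_assoc]

theorem pv_drop_takeWhile_length (p : Int → Bool) (l : List Int) :
    l.drop ((l.takeWhile p).length) = l.dropWhile p := by
  induction l with
  | nil => simp
  | cons x xs ih =>
    by_cases hx : p x
    · simp [List.takeWhile_cons, List.dropWhile_cons, hx, ih]
    · simp [List.takeWhile_cons, List.dropWhile_cons, hx]

theorem pvAOuter_eq (masks : List Int) (m : Int) : ∀ (i : Nat) (cg : List (Option Int)) (gid : Int),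
    cg.length = masks.length → i ≤ masks.length →
    cg.drop i = List.replicate (masks.length - i) none →
    pvAOuter masks m i cg gid = cg.take i ++ pvG m (masks.drop i) gid := by
  intro i cg gid
  induction i, cg, gid using pvAOuter.induct (masks := masks) (min_length := m) with
  | case1 i cg gid h h0 start i2 hcond ih =>
    have hs : start = i := rfl
    have hii : i2 = pvAInner masks i := rfl
    try rw [hs] at hcond
    try rw [hs] at ih
    try rw [hii] at hcond
    try rw [hii] at ih
    intro hlen hi hdrop
    have hm0 : masks[i] = 0 := by simpa using h0
    have htw : (masks.drop i).takeWhile (· == 0)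
        = masks[i] :: (masks.drop (i + 1)).takeWhile (· == 0) := by
      rw [List.drop_eq_getElem_cons h, List.takeWhile_cons, h0]
      rfl
    have hI : pvAInner masks i = i + 1 + ((masks.drop (i + 1)).takeWhile (· == 0)).length := by
      rw [pvAInner_eq, htw]; simp only [List.length_cons]; omega
    have htle : ((masks.drop (i + 1)).takeWhile (· == 0)).length ≤ masks.length - (i + 1) := by
      have h1 := (List.takeWhile_sublist (l := masks.drop (i + 1)) (· == 0)).length_le
      simp at h1; omega
    set t := ((masks.drop (i + 1)).takeWhile (· == 0)).length with ht
    have hi2le : pvAInner masks i ≤ masks.length := by omega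
    have hr : pvAInner masks i - i = t + 1 := by omega
    have hfold : (List.range' i (pvAInner masks i - i)).foldl (fun c j => c.set j (some gid)) cg
        = (cg.take i ++ List.replicate (t + 1) (some gid)) ++ cg.drop (i + (t + 1)) := by
      rw [hr, pvFill_eq gid (t + 1) cg i (by omega)]
    have hdrop2 : cg.drop (i + (t + 1)) = List.replicate (masks.length - (i + t + 1)) none := by
      have : cg.drop (i + (t + 1)) = (cg.drop i).drop (t + 1) := by
        rw [List.drop_drop]
      rw [this, hdrop, List.drop_replicate]
      congr 1 <;> omega
    have hpre : (cg.take i).length = i := by simp; omega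
    have hplen : ((cg.take i ++ List.replicate (t + 1) (some gid))).length = i + t + 1 := by
      simp [hpre]; omega
    have hlen' : ((List.range' i (pvAInner masks i - i)).foldl (fun c j => c.set j (some gid)) cg).length
        = masks.length := by
      rw [hfold]; simp [hpre]; omega
    have hdrop' : ((List.range' i (pvAInner masks i - i)).foldl (fun c j => c.set j (some gid)) cg).drop (pvAInner masks i)
        = List.replicate (masks.length - pvAInner masks i) none := by
      rw [hfold, hI, List.drop_append]
      have e1 : List.drop (i + 1 + t) (cg.take i ++ List.replicate (t + 1) (some gid)) = [] :=
        List.drop_eq_nil_of_le (by rw [hplen]; omega)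
      have e2 : i + 1 + t - (cg.take i ++ List.replicate (t + 1) (some gid)).length = 0 := by
        rw [hplen]; omega
      rw [e1, e2, List.nil_append, List.drop_zero, hdrop2]
      congr 1 <;> omega
    rw [pvAOuter]
    simp only [h, dite_true, h0, if_pos, hcond, ite_true]
    rw [ih hlen' hi2le hdrop']
    have htake' : ((List.range' i (pvAInner masks i - i)).foldl (fun c j => c.set j (some gid)) cg).take (pvAInner masks i)
        = cg.take i ++ List.replicate (t + 1) (some gid) := by
      rw [hfold, List.take_append]
      have e1 : List.take (pvAInner masks i) (cg.take i ++ List.replicate (t + 1) (some gid))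
          = cg.take i ++ List.replicate (t + 1) (some gid) :=
        List.take_of_length_le (by rw [hplen]; omega)
      have e2 : pvAInner masks i - (cg.take i ++ List.replicate (t + 1) (some gid)).length = 0 := by
        rw [hplen]; omega
      rw [e1, e2, List.take_zero, List.append_nil]
    have hdm : masks.drop (pvAInner masks i) = (masks.drop (i + 1)).dropWhile (· == 0) := by
      rw [hI, ← pv_drop_takeWhile_length (· == 0) (masks.drop (i + 1)), List.drop_drop, ← ht]
    rw [htake', hdm]
    -- now the right-hand side
    rw [List.drop_eq_getElem_cons h, hm0, pvG_cons]
    have hc : ((0 : Int) == 0 && decide (m ≤ ((((masks.drop (i + 1)).takeWhile (· == (0 : Int))).length + 1 : Nat) : Int))) = true := by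
      have hle : m ≤ (t : Int) + 1 := by
        rw [hI] at hcond; push_cast at hcond ⊢; omega
      simp only [← ht]
      simp [hle]
    have htw0 : (masks.drop (i + 1)).takeWhile (· == (0 : Int)) = (masks.drop (i + 1)).takeWhile (· == 0) := rfl
    rw [hc, if_pos rfl]
    rw [List.append_assoc]
  | case2 i cg gid h h0 start i2 hcond ih =>
    have hs : start = i := rfl
    have hii : i2 = pvAInner masks i := rfl
    try rw [hs] at hcond
    try rw [hs] at ih
    try rw [hii] at hcond
    try rw [hii] at ih
    intro hlen hi hdrop
    have hm0 : masks[i] = 0 := by simpa using h0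
    have htw : (masks.drop i).takeWhile (· == 0)
        = masks[i] :: (masks.drop (i + 1)).takeWhile (· == 0) := by
      rw [List.drop_eq_getElem_cons h, List.takeWhile_cons, h0]
      rfl
    have hI : pvAInner masks i = i + 1 + ((masks.drop (i + 1)).takeWhile (· == 0)).length := by
      rw [pvAInner_eq, htw]; simp only [List.length_cons]; omega
    have htle : ((masks.drop (i + 1)).takeWhile (· == 0)).length ≤ masks.length - (i + 1) := by
      have h1 := (List.takeWhile_sublist (l := masks.drop (i + 1)) (· == 0)).length_le
      simp at h1; omega
    set t := ((masks.drop (i + 1)).takeWhile (· == 0)).length with ht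
    have hi2le : pvAInner masks i ≤ masks.length := by omega
    have hdrop' : cg.drop (pvAInner masks i) = List.replicate (masks.length - pvAInner masks i) none := by
      have : cg.drop (pvAInner masks i) = (cg.drop i).drop (t + 1) := by
        rw [List.drop_drop]; congr 1 <;> omega
      rw [this, hdrop, List.drop_replicate]
      congr 1 <;> omega
    rw [pvAOuter]
    simp only [h, dite_true, h0, if_pos, hcond, ite_false, if_neg, not_false_iff]
    rw [ih hlen hi2le hdrop']
    have htake' : cg.take (pvAInner masks i) = cg.take i ++ List.replicate (t + 1) none := by
      have e3 : pvAInner masks i = i + (t + 1) := by omega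
      rw [e3, List.take_add, hdrop, List.take_replicate]
      have e4 : min (t + 1) (masks.length - i) = t + 1 := by omega
      rw [e4]
    have hdm : masks.drop (pvAInner masks i) = (masks.drop (i + 1)).dropWhile (· == 0) := by
      rw [hI, ← pv_drop_takeWhile_length (· == 0) (masks.drop (i + 1)), List.drop_drop, ← ht]
    rw [htake', hdm]
    rw [List.drop_eq_getElem_cons h, hm0, pvG_cons]
    have hc : ((0 : Int) == 0 && decide (m ≤ ((((masks.drop (i + 1)).takeWhile (· == (0 : Int))).length + 1 : Nat) : Int))) = false := by
      have hle : ¬ m ≤ (t : Int) + 1 := by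
        intro hle
        apply hcond
        rw [hI]; push_cast at hle ⊢; omega
      simp only [← ht]
      simp [hle]
    rw [hc, if_neg (by simp)]
    rw [List.append_assoc]
  | case3 i cg gid h h0 ih =>
    intro hlen hi hdrop
    have hm0 : ¬ masks[i] = 0 := by simpa using h0
    have hi1 : i + 1 ≤ masks.length := by omega
    have hdrop' : cg.drop (i + 1) = List.replicate (masks.length - (i + 1)) none := by
      have : cg.drop (i + 1) = (cg.drop i).drop 1 := by rw [List.drop_drop]
      rw [this, hdrop, List.drop_replicate]
      congr 1
    rw [pvAOuter]
    simp only [h, dite_true, h0, if_neg, Bool.false_eq_true, not_false_iff]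
    rw [ih hlen hi1 hdrop']
    have htake' : cg.take (i + 1) = cg.take i ++ [none] := by
      rw [List.take_add, hdrop, List.take_replicate]
      have e4 : min 1 (masks.length - i) = 1 := by omega
      rw [e4]
      rfl
    rw [htake', List.drop_eq_getElem_cons h, pvG_nonzero m masks[i] hm0]
    simp [List.append_assoc]
  | case4 i cg gid h =>
    intro hlen hi hdrop
    have hie : i = masks.length := by omega
    rw [pvAOuter]
    simp only [h, dite_false]
    have h1 : masks.drop i = [] := List.drop_eq_nil_of_le (by omega)
    have h2 : cg.take i = cg := List.take_of_length_le (by omega)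
    rw [h1, h2]
    simp [pvG]

-- ----- B side -----
def pvRle (l : List Int) : List (Int × Int) :=
  match l with
  | [] => []
  | x :: xs => (x, ((xs.takeWhile (· == x)).length : Int) + 1) :: pvRle (xs.dropWhile (· == x))
termination_by l.length
decreasing_by
  have := List.length_dropWhile_le (p := (· == x)) (l := xs); simp only [List.length_cons]; omega

theorem pvRle_merge (xs : List Int) : ∀ (acc : List (Int × Int)) (v : Int) (c : Int),
    xs.foldl pvRleStep (acc ++ [(v, c)])
      = acc ++ (v, c + ((xs.takeWhile (· == v)).length : Int)) :: pvRle (xs.dropWhile (· == v)) := by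
  induction xs with
  | nil => intro acc v c; simp [pvRle]
  | cons x xs ih =>
    intro acc v c
    by_cases hx : x == v
    · have hxv : x = v := by simpa using hx
      subst hxv
      have hstep : pvRleStep (acc ++ [(x, c)]) x = acc ++ [(x, c + 1)] := by
        simp [pvRleStep, List.getLast?_concat, List.dropLast_concat]
      rw [List.foldl_cons, hstep, ih acc x (c + 1)]
      simp only [List.takeWhile_cons, List.dropWhile_cons, beq_self_eq_true, if_pos, List.length_cons]
      push_cast; ring_nf
    · have hstep : pvRleStep (acc ++ [(v, c)]) x = (acc ++ [(v, c)]) ++ [(x, 1)] := by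
        have hvx : ¬ v = x := fun h => hx (by simp [h])
        simp [pvRleStep, hvx]
      rw [List.foldl_cons, hstep, ih (acc ++ [(v, c)]) x 1]
      have ht : List.takeWhile (· == v) (x :: xs) = [] := by simp [List.takeWhile_cons, hx]
      have hd : List.dropWhile (· == v) (x :: xs) = x :: xs := by simp [List.dropWhile_cons, hx]
      rw [ht, hd]
      conv_rhs => rw [pvRle.eq_def]
      simp [add_comm]

theorem pvFoldRle_eq (l : List Int) : l.foldl pvRleStep [] = pvRle l := by
  cases l with
  | nil => simp [pvRle]
  | cons x xs =>
    have hstep : pvRleStep [] x = [(x, 1)] := by simp [pvRleStep]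
    have := pvRle_merge xs [] x 1
    rw [pvRle.eq_def]
    simp only [List.foldl_cons, hstep]
    simp only [List.nil_append] at this
    rw [this]
    ring_nf

theorem pvRle_cons (x : Int) (xs : List Int) :
    pvRle (x :: xs) = (x, ((xs.takeWhile (· == x)).length : Int) + 1) :: pvRle (xs.dropWhile (· == x)) := by
  rw [pvRle.eq_def]

theorem pvEmit_eq (m : Int) (l : List Int) : ∀ (out : List (Option Int)) (gid : Int),
    ((pvRle l).foldl (pvEmitStep m) (out, gid)).1 = out ++ pvG m l gid := by
  induction l using pvRle.induct with
  | case1 => intro out gid; simp [pvRle, pvG]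
  | case2 x xs ih =>
    intro out gid
    rw [pvRle_cons, List.foldl_cons, pvG_cons]
    have hcast : ((List.takeWhile (· == x) xs).length : Int) + 1
        = (((List.takeWhile (· == x) xs).length + 1 : Nat) : Int) := by push_cast; ring
    simp only [pvEmitStep, hcast, Int.toNat_natCast]
    by_cases hc : (x == 0 && decide (m ≤ (((List.takeWhile (· == x) xs).length + 1 : Nat) : Int))) = true
    · simp only [hc, if_pos]
      rw [ih]
      simp [List.append_assoc]
    · have hc' : (x == 0 && decide (m ≤ (((List.takeWhile (· == x) xs).length + 1 : Nat) : Int))) = false := by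
        simpa using hc
      simp only [hc', if_neg, Bool.false_eq_true, not_false_eq_true]
      rw [ih]
      simp [List.append_assoc]

-- ===== VERDICT (by name: the statement is the Claim_ definition above) =====
theorem identify_collapse_groups_py_spec : Claim_equal_identify_collapse_groups_py := by
  intro masks m _
  unfold Spec_identify_collapse_groups_py identify_collapse_groups_py identify_collapse_groups_py_alt
  rw [pvFoldRle_eq, pvEmit_eq, pvAOuter_eq] <;> simp
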